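-- pv_equiv track=rewrite | github.com/y-tetsu/reversi | reversi/BitBoardMethods/GetBoardInfo.py | get_board_info
-- ===== SOURCE A (Python) =====
-- def get_board_info(size, b, w):
--     """
--     ボードの情報(黒:1、白:-1、空き:0)を返す
--     """
--     board_info = []
--     mask = 1 << (size * size - 1)
--
--     for y in range(size):
--         tmp = []
--         for x in range(size):
--             if b & mask:
--                 tmp.append(1)
--             elif w & mask:
--                 tmp.append(-1)
--             else:
--                 tmp.append(0)
--             mask >>= 1
--         board_info.append(tmp)
--
--     return board_info
-- ===== SOURCE B (Python) =====
-- def get_board_info(size, b, w):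
--     """
--     ボードの情報(黒:1、白:-1、空き:0)を返す
--     """
--     if size <= 0:
--         return []
--     flat = []
--     for _ in range(size * size):
--         flat.append(1 if b & 1 else -1 if w & 1 else 0)
--         b >>= 1
--         w >>= 1
--     flat.reverse()
--     return [flat[y * size:(y + 1) * size] for y in range(size)]
-- ===== Notes on version B (the rewrite author's own statement) =====
-- stated objective: faster
-- what changed: Instead of sweeping one precomputed size^2-bit high-bit mask over both boards inside nested row/column loops, B scans both bitboards once from the least significant bit (testing b & 1 and shifting the boards themselves), reverses the flat cell list and slices it into rows; nonpositive sizes yield the empty board directly.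
-- crash fix: For size = 0 A raises ValueError (1 << -1, negative shift count) while B returns the empty board []. — e.g. on get_board_info(0, 1, 2): A raises ValueError, B returns []
import Mathlib
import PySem

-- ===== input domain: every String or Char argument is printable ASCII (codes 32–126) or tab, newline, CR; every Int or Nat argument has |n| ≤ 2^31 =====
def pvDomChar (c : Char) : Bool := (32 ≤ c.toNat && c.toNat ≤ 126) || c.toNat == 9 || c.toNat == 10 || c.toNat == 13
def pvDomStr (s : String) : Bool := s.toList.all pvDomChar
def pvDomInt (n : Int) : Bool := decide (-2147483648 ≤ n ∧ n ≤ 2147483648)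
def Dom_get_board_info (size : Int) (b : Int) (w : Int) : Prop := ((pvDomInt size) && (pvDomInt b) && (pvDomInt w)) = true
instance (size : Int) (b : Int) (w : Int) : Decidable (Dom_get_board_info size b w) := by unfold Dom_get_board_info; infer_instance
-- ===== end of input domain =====

-- B replaces A's nested loops sweeping one size^2-bit mask by a single LSB-first scan of the
-- shifted boards (one low-bit test per cell, measured faster in a timing run), then reverses
-- and slices the flat cell list into rows; for size = 0 A raises ValueError while B returns [].


-- ===== PORT A =====
-- literal port of A: mask = 1 << (size*size - 1), nested for-loops over range(size),
-- mask >>= 1 each cell.  (For size = 0 Python raises on the negative shift; excluded by Pre_.)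
def get_board_info (size : Int) (b : Int) (w : Int) : List (List Int) :=
  let mask : Int := 1 <<< (size * size - 1).toNat
  ((PySem.List.pyRange 0 size 1).foldl
    (fun (st : List (List Int) × Int) (_y : Int) =>
      let inner := (PySem.List.pyRange 0 size 1).foldl
        (fun (st2 : List Int × Int) (_x : Int) =>
          ((if PySem.Int.band b st2.2 ≠ 0 then st2.1 ++ [1]
            else if PySem.Int.band w st2.2 ≠ 0 then st2.1 ++ [-1]
            else st2.1 ++ [0]), st2.2 >>> (1:Nat)))
        ([], st.2)
      (st.1 ++ [inner.1], inner.2))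
    ([], mask)).1

-- ===== PORT B =====
-- literal port of B: empty board for nonpositive size; one LSB-first pass shifting b and w,
-- reverse the flat list, slice it into rows.
def get_board_info_alt (size : Int) (b : Int) (w : Int) : List (List Int) :=
  if size ≤ 0 then []
  else
    let st := (PySem.List.pyRange 0 (size * size) 1).foldl
      (fun (st : List Int × Int × Int) (_k : Int) =>
        (st.1 ++ [if PySem.Int.band st.2.1 1 ≠ 0 then 1
                  else if PySem.Int.band st.2.2 1 ≠ 0 then -1 else 0],
         st.2.1 >>> (1:Nat), st.2.2 >>> (1:Nat)))
      ([], b, w)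
    let flat := st.1.reverse
    (PySem.List.pyRange 0 size 1).map (fun y =>
      PySem.List.slice flat (some (y * size)) (some ((y + 1) * size)))

-- ===== PRECONDITION & SPEC =====
-- Pre_ excludes exactly size = 0, where Python A raises ValueError ('1 << -1', negative shift).
def Pre_get_board_info (size : Int) (b : Int) (w : Int) : Prop := size ≠ 0
instance (size : Int) (b : Int) (w : Int) : Decidable (Pre_get_board_info size b w) := by unfold Pre_get_board_info; infer_instance
def pvWitness_get_board_info : Int × Int × Int := (2, 9, 6)

-- For size = 0 A raises ValueError (negative shift count) while B returns the empty board [].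
def Raises_get_board_info (size : Int) (b : Int) (w : Int) : Prop := size = 0
instance (size : Int) (b : Int) (w : Int) : Decidable (Raises_get_board_info size b w) := by unfold Raises_get_board_info; infer_instance
def pvRaiseWitness_get_board_info : Int × Int × Int := (0, 1, 2)
def pvRaiseWitnessOut_get_board_info : List (List Int) := []

def Spec_get_board_info (size : Int) (b : Int) (w : Int) (out : List (List Int)) : Prop := out = get_board_info_alt size b w
instance (size : Int) (b : Int) (w : Int) (out : List (List Int)) : Decidable (Spec_get_board_info size b w out) := by unfold Spec_get_board_info; infer_instance

-- ===== CLAIM (what is proved, stated in full; the proofs are below) =====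
def Claim_equal_get_board_info : Prop := ∀ (size : Int) (b : Int) (w : Int), Dom_get_board_info size b w → Pre_get_board_info size b w → Spec_get_board_info size b w (get_board_info size b w)
def Claim_raises_get_board_info : Prop := (∀ (size : Int) (b : Int) (w : Int), Dom_get_board_info size b w → Raises_get_board_info size b w → ¬ Pre_get_board_info size b w) ∧ (Dom_get_board_info (pvRaiseWitness_get_board_info.1) (pvRaiseWitness_get_board_info.2.1) (pvRaiseWitness_get_board_info.2.2) ∧ Raises_get_board_info (pvRaiseWitness_get_board_info.1) (pvRaiseWitness_get_board_info.2.1) (pvRaiseWitness_get_board_info.2.2) ∧ get_board_info_alt (pvRaiseWitness_get_board_info.1) (pvRaiseWitness_get_board_info.2.1) (pvRaiseWitness_get_board_info.2.2) = pvRaiseWitnessOut_get_board_info)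

-- ===== LEMMAS AND PROOFS =====

-- the intended value of cell k (bit k of the boards; black first)
def pvCell (b w : Int) (k : Nat) : Int :=
  if b.testBit k then 1 else if w.testBit k then -1 else 0

-- the cell value as A computes it: test against the shifted mask M >>> j
def pvCellA (b w M : Int) (j : Nat) : Int :=
  if PySem.Int.band b (M >>> j) ≠ 0 then 1
  else if PySem.Int.band w (M >>> j) ≠ 0 then -1 else 0

theorem band_one_ne (v : Int) : (PySem.Int.band v 1 ≠ 0) ↔ v.testBit 0 := by
  rw [PySem.Int.band_one, PySem.Int.mod_eq_emod_of_pos (b := 2) (by norm_num)]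
  rcases v with a | a
  · rw [Int.ofNat_eq_natCast]
    simp [Int.testBit, Nat.testBit_zero]
    omega
  · simp only [Int.testBit, Nat.testBit_zero, Int.negSucc_eq]
    simp
    omega

theorem band_pow_ne (v : Int) (m : Nat) :
    (PySem.Int.band v ((2 ^ m : Nat) : Int) ≠ 0) ↔ v.testBit m := by
  rcases v with a | a
  · rw [Int.ofNat_eq_natCast, PySem.Int.band_natCast]
    simp only [Int.testBit, Nat.and_two_pow, ne_eq, Nat.cast_eq_zero]
    cases h : a.testBit m <;> simp
  · rw [PySem.Int.band_comm]
    have h2 : ¬ (0:Int) ≤ Int.negSucc a := by simp [Int.negSucc_eq]; omega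
    rw [PySem.Int.band]
    rw [if_pos (by positivity : (0:Int) ≤ ((2 ^ m : Nat) : Int)), if_neg h2]
    have e1 : (-(Int.negSucc a) - 1).toNat = a := by simp [Int.negSucc_eq]
    have e2 : (((2 ^ m : Nat) : Int)).toNat = 2 ^ m := Int.toNat_natCast _
    rw [e1, e2, Nat.two_pow_and]
    simp only [Int.testBit]
    cases h : a.testBit m <;> simp

theorem shiftr_testBit_zero (v : Int) (m : Nat) : (v >>> m).testBit 0 = v.testBit m := by
  rcases v with a | a
  · show (Int.ofNat (a >>> m)).testBit 0 = (Int.ofNat a).testBit m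
    simp only [Int.testBit, Nat.testBit_shiftRight, Nat.add_zero]
  · show (Int.negSucc (a >>> m)).testBit 0 = (Int.negSucc a).testBit m
    simp only [Int.testBit, Nat.testBit_shiftRight, Nat.add_zero]

theorem shiftr_band_one (v : Int) (m : Nat) :
    (PySem.Int.band (v >>> m) 1 ≠ 0) ↔ v.testBit m := by
  rw [band_one_ne, shiftr_testBit_zero]

theorem shiftr_shiftr (v : Int) (a b : Nat) : v >>> a >>> b = v >>> (a + b) :=
  Eq.symm (Int.shiftRight_add v a b)

-- B's flat-building loop: after consuming a list, the flat list holds the cells LSB-first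
theorem bloop (b w : Int) (L : List Int) (j : Nat) :
    L.foldl
      (fun (st : List Int × Int × Int) (_k : Int) =>
        (st.1 ++ [if PySem.Int.band st.2.1 1 ≠ 0 then 1
                  else if PySem.Int.band st.2.2 1 ≠ 0 then -1 else 0],
         st.2.1 >>> (1:Nat), st.2.2 >>> (1:Nat)))
      ((List.range j).map (pvCell b w), b >>> j, w >>> j)
    = ((List.range (j + L.length)).map (pvCell b w),
       b >>> (j + L.length), w >>> (j + L.length)) := by
  induction L generalizing j with
  | nil => simp
  | cons hd t ih =>
    simp only [List.foldl_cons]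
    have e1 : (List.range j).map (pvCell b w)
        ++ [if PySem.Int.band (b >>> j) 1 ≠ 0 then 1
            else if PySem.Int.band (w >>> j) 1 ≠ 0 then -1 else 0]
        = (List.range (j+1)).map (pvCell b w) := by
      rw [List.range_succ, List.map_append]
      simp [pvCell, shiftr_band_one]
    rw [e1, shiftr_shiftr b j 1, shiftr_shiftr w j 1, ih (j+1)]
    have : j + 1 + t.length = j + (t.length + 1) := by omega
    rw [this]
    rfl

-- A's inner loop: appends the next L.length cells and shifts the mask
theorem aInner (b w M : Int) (L : List Int) (i : Nat) (tmp : List Int) :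
    L.foldl
      (fun (st2 : List Int × Int) (_x : Int) =>
        ((if PySem.Int.band b st2.2 ≠ 0 then st2.1 ++ [1]
          else if PySem.Int.band w st2.2 ≠ 0 then st2.1 ++ [-1]
          else st2.1 ++ [0]), st2.2 >>> (1:Nat)))
      (tmp, M >>> i)
    = (tmp ++ (List.range L.length).map (fun x => pvCellA b w M (i + x)),
       M >>> (i + L.length)) := by
  induction L generalizing i tmp with
  | nil => simp
  | cons hd t ih =>
    simp only [List.foldl_cons]
    have e1 : (if PySem.Int.band b (M >>> i) ≠ 0 then tmp ++ [1]
          else if PySem.Int.band w (M >>> i) ≠ 0 then tmp ++ [-1]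
          else tmp ++ [0]) = tmp ++ [pvCellA b w M i] := by
      unfold pvCellA; split_ifs <;> rfl
    rw [e1, shiftr_shiftr M i 1, ih (i+1)]
    have e2 : tmp ++ [pvCellA b w M i]
        ++ (List.range t.length).map (fun x => pvCellA b w M (i + 1 + x))
        = tmp ++ (List.range (t.length + 1)).map (fun x => pvCellA b w M (i + x)) := by
      rw [List.range_succ_eq_map, List.append_assoc]
      simp [List.map_map, Function.comp]
      intro x _
      congr 1
      omega
    rw [e2]
    have : i + 1 + t.length = i + (t.length + 1) := by omega
    rw [this]
    rfl

-- A's outer loop: appends one row of s cells per element and shifts the mask by s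
theorem aOuter (b w M : Int) (inner : List Int) (L : List Int) (y : Nat)
    (rows : List (List Int)) :
    L.foldl
      (fun (st : List (List Int) × Int) (_y : Int) =>
        let innerSt := inner.foldl
          (fun (st2 : List Int × Int) (_x : Int) =>
            ((if PySem.Int.band b st2.2 ≠ 0 then st2.1 ++ [1]
              else if PySem.Int.band w st2.2 ≠ 0 then st2.1 ++ [-1]
              else st2.1 ++ [0]), st2.2 >>> (1:Nat)))
          ([], st.2)
        (st.1 ++ [innerSt.1], innerSt.2))
      (rows, M >>> (y * inner.length))
    = (rows ++ (List.range L.length).map (fun y' =>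
         (List.range inner.length).map (fun x =>
           pvCellA b w M ((y + y') * inner.length + x))),
       M >>> ((y + L.length) * inner.length)) := by
  induction L generalizing y rows with
  | nil => simp
  | cons hd t ih =>
    simp only [List.foldl_cons]
    rw [aInner b w M inner (y * inner.length) []]
    simp only [List.nil_append]
    have e0 : y * inner.length + inner.length = (y + 1) * inner.length := by ring
    rw [e0, ih (y + 1)]
    have e2 : rows ++ [(List.range inner.length).map (fun x => pvCellA b w M (y * inner.length + x))]
        ++ (List.range t.length).map (fun y' =>
            (List.range inner.length).map (fun x => pvCellA b w M ((y + 1 + y') * inner.length + x)))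
        = rows ++ (List.range (t.length + 1)).map (fun y' =>
            (List.range inner.length).map (fun x => pvCellA b w M ((y + y') * inner.length + x))) := by
      rw [List.range_succ_eq_map, List.append_assoc]
      simp [List.map_map, Function.comp]
      intro y' _ x _
      have : y + 1 + y' = y + (y' + 1) := by omega
      rw [this]
    rw [e2]
    have : y + 1 + t.length = y + (t.length + 1) := by omega
    rw [this]
    rfl

theorem reverse_map_range {α : Type} (f : Nat → α) (n : Nat) :
    ((List.range n).map f).reverse = (List.range n).map (fun k => f (n - 1 - k)) := by
  apply List.ext_getElem
  · simp
  · intro i h1 h2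
    simp only [List.length_map, List.length_range] at h1 h2
    rw [List.getElem_reverse]
    simp only [List.getElem_map, List.getElem_range, List.length_map, List.length_range]

theorem drop_take_map_range {α : Type} (g : Nat → α) (n j s : Nat) (h : j + s ≤ n) :
    ((((List.range n).map g).drop j).take s) = (List.range s).map (fun x => g (j + x)) := by
  apply List.ext_getElem
  · simp
    omega
  · intro i h1 h2
    simp only [List.getElem_take, List.getElem_drop, List.getElem_map, List.getElem_range]


theorem natCast_shiftr (a m : Nat) : ((a : Nat) : Int) >>> m = ((a >>> m : Nat) : Int) := rfl

theorem shiftr_zero (v : Int) : v >>> (0:Nat) = v := by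
  rcases v with a | a <;> rfl

-- A's test against mask 2^(n-1) >> j is the bit test of cell n-1-j
theorem cellA_eq_cell (b w : Int) (n j : Nat) (_hn : 0 < n) (hj : j ≤ n - 1) :
    pvCellA b w ((2 ^ (n - 1) : Nat) : Int) j = pvCell b w (n - 1 - j) := by
  unfold pvCellA pvCell
  rw [natCast_shiftr]
  have e : (2 : Nat) ^ (n - 1) >>> j = 2 ^ (n - 1 - j) := by
    rw [Nat.shiftRight_eq_div_pow, Nat.pow_div hj (by norm_num)]
  rw [e]
  simp only [ne_eq, band_pow_ne]

theorem main_equiv : ∀ (size : Int) (b : Int) (w : Int), size ≠ 0 → get_board_info size b w = get_board_info_alt size b w := by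
  intro size b w hs
  rcases lt_or_gt_of_ne hs with hneg | hpos
  · -- negative size: both sides are the empty board
    rw [get_board_info, get_board_info_alt]
    rw [PySem.List.pyRange_one_eq_nil (by omega)]
    simp [le_of_lt hneg]
  · -- positive size
    obtain ⟨s, rfl⟩ : ∃ s : Nat, size = (s : Int) := ⟨size.toNat, (Int.toNat_of_nonneg (le_of_lt hpos)).symm⟩
    have hs0 : 0 < s := by exact_mod_cast hpos
    set n := s * s with hn
    have hn0 : 0 < n := Nat.mul_pos hs0 hs0
    have hlen : (PySem.List.pyRange 0 (s : Int) 1).length = s := by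
      rw [PySem.List.length_pyRange_one]; simp
    have hmask : ((s : Int) * (s : Int) - 1).toNat = n - 1 := by
      have : (s : Int) * (s : Int) = ((n : Nat) : Int) := by push_cast [hn]; ring
      rw [this]; omega
    rw [get_board_info, get_board_info_alt, if_neg (by omega : ¬ (s : Int) ≤ 0)]
    rw [hmask, Nat.one_shiftLeft]
    -- A side: apply the outer-loop characterization
    have hA0 : ((2 ^ (n-1) : Nat) : Int) = ((2 ^ (n-1) : Nat) : Int) >>> (0 * (PySem.List.pyRange 0 (s : Int) 1).length) := by
      rw [Nat.zero_mul, shiftr_zero]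
    rw [hA0, aOuter b w ((2 ^ (n-1) : Nat) : Int) (PySem.List.pyRange 0 (s : Int) 1) (PySem.List.pyRange 0 (s : Int) 1) 0 []]
    simp only [List.nil_append, hlen]
    -- B side: apply the flat-loop characterization
    have hB0 : (([] : List Int), b, w) = ((List.range 0).map (pvCell b w), b >>> (0:Nat), w >>> (0:Nat)) := by
      simp [shiftr_zero b, shiftr_zero w]
    have hnlen : (PySem.List.pyRange 0 ((s : Int) * (s : Int)) 1).length = n := by
      rw [PySem.List.length_pyRange_one]; push_cast [hn]; rw [Int.sub_zero]
      rw [show (s : Int) * (s : Int) = ((n : Nat) : Int) by push_cast [hn]; ring]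
      exact Int.toNat_natCast n
    rw [hB0, bloop b w (PySem.List.pyRange 0 ((s : Int) * (s : Int)) 1) 0]
    simp only [hnlen, Nat.zero_add, reverse_map_range]
    -- both sides are maps over the rows
    rw [PySem.List.pyRange_one]
    simp only [Int.sub_zero, Int.toNat_natCast, List.map_map]
    apply List.map_congr_left
    intro y hy
    have hy' : y < s := List.mem_range.mp hy
    simp only [Function.comp]
    -- B's row y is a slice of the reversed flat list
    have hc1 : ((0 : Int) + (y : Nat)) * (s : Int) = (((y * s : Nat)) : Int) := by push_cast; ring
    have hc2 : ((0 : Int) + (y : Nat) + 1) * (s : Int) = ((((y+1) * s : Nat)) : Int) := by push_cast; ring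
    rw [hc1, hc2, PySem.List.slice_natCast]
    have hsub : (y+1) * s - y * s = s := by
      have : (y+1) * s = y * s + s := by ring
      omega
    rw [hsub, drop_take_map_range _ n (y * s) s (by
      have : (y+1) * s ≤ s * s := Nat.mul_le_mul_right s (by omega)
      have e : (y+1) * s = y * s + s := by ring
      omega)]
    -- A's row y, cell by cell
    apply List.map_congr_left
    intro x hx
    have hx' : x < s := List.mem_range.mp hx
    have hbound : y * s + x ≤ n - 1 := by
      have h1 : (y+1) * s ≤ s * s := Nat.mul_le_mul_right s (by omega)
      have e : (y+1) * s = y * s + s := by ring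
      omega
    rw [cellA_eq_cell b w n (y * s + x) hn0 hbound]


-- ===== VERDICT (by name: the statement is the Claim_ definition above) =====
theorem get_board_info_spec : Claim_equal_get_board_info := by
  intro size b w _ hpre
  unfold Spec_get_board_info
  exact main_equiv size b w hpre

def get_board_info_raises : Claim_raises_get_board_info := by
  unfold Claim_raises_get_board_info
  exact ⟨fun _ _ _ _ h => by simp [Raises_get_board_info] at h; simp [Pre_get_board_info, h], by decide⟩
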